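-- pv_equiv track=rewrite | github.com/raionsakana-tul-computer-science/ppkwu | zadanie_2/flask_app.py | count_special_characters
-- ===== SOURCE A (Python) =====
-- def count_special_characters(text: str):
--     index, mark = 0, False
--     temp_letters = [0]
--
--     for c in text:
--         if not c.isnumeric() and not c.isupper() and not c.islower():
--             temp_letters[index] = temp_letters[index] + 1
--             mark = True
--         else:
--             mark = False
--
--         if not mark:
--             index += 1
--             temp_letters.append(0)
--
--     letters = [c for c in temp_letters if c != 0]
--     return sum(letters), len(letters), letters
-- ===== SOURCE B (Python) =====
-- def count_special_characters(text: str):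
--     def is_special(c):
--         return not c.isnumeric() and not c.isupper() and not c.islower()
--
--     lengths = []
--     i, n = 0, len(text)
--     while i < n:
--         if is_special(text[i]):
--             j = i
--             while j < n and is_special(text[j]):
--                 j += 1
--             lengths.append(j - i)
--             i = j
--         else:
--             i += 1
--     return sum(lengths), len(lengths), lengths
-- ===== Notes on version B (the rewrite author's own statement) =====
-- stated objective: simpler
-- what changed: Replaces A's mark/index accumulator that grows a zero-padded counter list and filters out the zeros afterwards with a direct two-pointer run scan that appends each maximal special-run length once, needing no sentinel zeros and no filtering pass.
import Mathlib
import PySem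

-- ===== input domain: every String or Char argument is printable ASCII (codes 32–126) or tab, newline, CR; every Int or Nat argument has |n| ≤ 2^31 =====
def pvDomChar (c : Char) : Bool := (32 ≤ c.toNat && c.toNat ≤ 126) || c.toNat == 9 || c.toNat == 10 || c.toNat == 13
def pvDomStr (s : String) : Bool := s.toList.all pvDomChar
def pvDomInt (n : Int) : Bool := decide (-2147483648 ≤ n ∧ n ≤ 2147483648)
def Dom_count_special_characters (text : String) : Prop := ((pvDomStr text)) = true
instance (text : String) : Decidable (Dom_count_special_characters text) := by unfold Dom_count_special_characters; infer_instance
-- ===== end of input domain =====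

-- B replaces A's mark/index zero-padded accumulator + filter with a direct two-pointer run scan (simpler; same O(n) cost).

-- shared predicate: not c.isnumeric() and not c.isupper() and not c.islower()
-- (on the ASCII domain, Python's isnumeric agrees with isdigit; PySem.Chars.isdigit is exact there)
def pvSpecial (c : Char) : Bool :=
  !PySem.Chars.isdigit c && !PySem.Chars.isupper c && !PySem.Chars.islower c

-- ===== PORT A =====
-- Python temp_letters[index] read / write; exact for 0 ≤ index < len (A's index always equals len-1, in range)
def pvGetAt (xs : List Int) (i : Int) : Int := (PySem.List.pyGet? xs i).getD 0
def pvSetAt (xs : List Int) (i : Int) (v : Int) : List Int :=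
  if i < 0 then xs.set (xs.length - (-i).toNat) v else xs.set i.toNat v

-- the for-loop over text, state (index, mark, temp_letters); mark is reassigned each iteration before use
def pvALoop : List Char → Int → Bool → List Int → List Int
  | [], _, _, temp => temp
  | c :: cs, index, _mark, temp =>
    if pvSpecial c then
      -- mark = True: no append
      pvALoop cs index true (pvSetAt temp index (pvGetAt temp index + 1))
    else
      -- mark = False: index += 1; temp_letters.append(0)
      pvALoop cs (index + 1) false (temp ++ [0])

def count_special_characters (text : String) : Int × Int × List Int :=
  let temp_letters := pvALoop text.toList 0 false [0]
  let letters := temp_letters.filter (fun c => c != 0)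
  (letters.sum, (letters.length : Int), letters)

-- ===== PORT B =====
-- the outer while-loop: on a special char advance j over the run (takeWhile/dropWhile), append j - i; else i += 1
def pvBLoop : List Char → List Int
  | [] => []
  | c :: cs =>
    if pvSpecial c then
      ((cs.takeWhile pvSpecial).length + 1 : Int) :: pvBLoop (cs.dropWhile pvSpecial)
    else
      pvBLoop cs
termination_by cs => cs.length
decreasing_by
  · simpa using Nat.lt_succ_of_le (List.length_dropWhile_le pvSpecial cs)
  · simp

def count_special_characters_alt (text : String) : Int × Int × List Int :=
  let lengths := pvBLoop text.toList
  (lengths.sum, (lengths.length : Int), lengths)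

-- ===== PRECONDITION & SPEC =====
def Spec_count_special_characters (text : String) (out : Int × Int × List Int) : Prop := out = count_special_characters_alt text
instance (text : String) (out : Int × Int × List Int) : Decidable (Spec_count_special_characters text out) := by unfold Spec_count_special_characters; infer_instance

-- ===== CLAIM (what is proved, stated in full; the proofs are below) =====
def Claim_equal_count_special_characters : Prop := ∀ (text : String), Dom_count_special_characters text → Spec_count_special_characters text (count_special_characters text)

-- ===== LEMMAS AND PROOFS =====

theorem pvGetAt_append (acc : List Int) (x : Int) : pvGetAt (acc ++ [x]) (acc.length : Int) = x := by
  simp [pvGetAt, PySem.List.pyGet?, PySem.List.pyIdx?]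

theorem pvSetAt_append (acc : List Int) (x v : Int) :
    pvSetAt (acc ++ [x]) (acc.length : Int) v = acc ++ [v] := by
  simp [pvSetAt]

-- main invariant: running A's loop from state (acc ++ [k], index = |acc|) and filtering the zeros
-- yields acc's filtered part followed by B's runs; the pending counter k ≥ 1 absorbs the current run.
theorem pvLoop_invariant (cs : List Char) :
    (∀ (acc : List Int) (m : Bool),
      (pvALoop cs (acc.length : Int) m (acc ++ [0])).filter (fun c => c != 0)
        = acc.filter (fun c => c != 0) ++ pvBLoop cs)
    ∧ (∀ (acc : List Int) (m : Bool) (k : Int), 1 ≤ k →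
      (pvALoop cs (acc.length : Int) m (acc ++ [k])).filter (fun c => c != 0)
        = acc.filter (fun c => c != 0)
            ++ (k + ((cs.takeWhile pvSpecial).length : Int)) :: pvBLoop (cs.dropWhile pvSpecial)) := by
  induction cs with
  | nil =>
    constructor
    · intro acc m; simp [pvALoop, pvBLoop, List.filter_append]
    · intro acc m k hk
      have hkne : (k != 0) = true := by simp; omega
      simp [pvALoop, pvBLoop, List.filter_append, List.filter, hkne]
  | cons c cs ih =>
    obtain ⟨ih0, ih1⟩ := ih
    constructor
    · intro acc m
      by_cases hc : pvSpecial c = true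
      · rw [show (pvALoop (c :: cs) (acc.length : Int) m (acc ++ [0]))
              = pvALoop cs (acc.length : Int) true (acc ++ [1]) by
            simp [pvALoop, hc, pvGetAt_append, pvSetAt_append]]
        rw [ih1 acc true 1 (le_refl 1)]
        simp [pvBLoop, hc]
        ring_nf
      · rw [show (pvALoop (c :: cs) (acc.length : Int) m (acc ++ [0]))
              = pvALoop cs ((acc ++ [0]).length : Int) false ((acc ++ [0]) ++ [0]) by
            simp [pvALoop, hc]]
        rw [ih0 (acc ++ [0]) false]
        simp [pvBLoop, hc, List.filter_append]
    · intro acc m k hk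
      by_cases hc : pvSpecial c = true
      · rw [show (pvALoop (c :: cs) (acc.length : Int) m (acc ++ [k]))
              = pvALoop cs (acc.length : Int) true (acc ++ [k + 1]) by
            simp [pvALoop, hc, pvGetAt_append, pvSetAt_append]]
        rw [ih1 acc true (k + 1) (by omega)]
        simp [List.takeWhile, List.dropWhile, hc]
        ring_nf
      · rw [show (pvALoop (c :: cs) (acc.length : Int) m (acc ++ [k]))
              = pvALoop cs ((acc ++ [k]).length : Int) false ((acc ++ [k]) ++ [0]) by
            simp [pvALoop, hc]]
        rw [ih0 (acc ++ [k]) false]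
        have hkne : (k != 0) = true := by simp; omega
        simp [List.takeWhile, List.dropWhile, hc, List.filter_append, List.filter, hkne, pvBLoop]

-- ===== VERDICT (by name: the statement is the Claim_ definition above) =====
theorem count_special_characters_spec : Claim_equal_count_special_characters := by
  intro text _
  unfold Spec_count_special_characters count_special_characters count_special_characters_alt
  have h := (pvLoop_invariant text.toList).1 [] false
  simp at h
  simp [h]
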